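-- pv_equiv track=rewrite | github.com/LeoDessertenne/graphes | 1.3_automates/liremot.py | liremot
-- ===== SOURCE A (Python) =====
-- def liremot(T, E, m):
--     lst_etat = set()
--     for etat in E:
--         etat_mot = etat
--         mot_rest = m
--         while mot_rest:
--             lettre_actuelle = mot_rest[0]
--             transition_trouvee = False
--             for transition in T:
--                 if transition[0] == etat_mot and transition[1] == lettre_actuelle:
--                     etat_mot = transition[2]
--                     mot_rest = mot_rest[1:]
--                     transition_trouvee = True
--                     break
--             if not transition_trouvee:
--                 break
--         if mot_rest == "":
--             lst_etat.add(etat_mot)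
--     return list(lst_etat)
-- ===== SOURCE B (Python) =====
-- def liremot(T, E, m):
--     trans = {}
--     for q, a, r in T:
--         trans.setdefault((q, a), r)
--     frontier = set(E)
--     for lettre in m:
--         suivant = set()
--         for etat in frontier:
--             cle = (etat, lettre)
--             if cle in trans:
--                 suivant.add(trans[cle])
--         frontier = suivant
--     return list(frontier)
-- ===== Notes on version B (the rewrite author's own statement) =====
-- stated objective: faster
-- what changed: A follows the word separately from each start state, rescanning the transition list T for every (state,letter) step; B first builds a first-match transition dictionary from T once, then runs a single word-major simulation that carries a frontier set of live states across the letters of m.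
import Mathlib
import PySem

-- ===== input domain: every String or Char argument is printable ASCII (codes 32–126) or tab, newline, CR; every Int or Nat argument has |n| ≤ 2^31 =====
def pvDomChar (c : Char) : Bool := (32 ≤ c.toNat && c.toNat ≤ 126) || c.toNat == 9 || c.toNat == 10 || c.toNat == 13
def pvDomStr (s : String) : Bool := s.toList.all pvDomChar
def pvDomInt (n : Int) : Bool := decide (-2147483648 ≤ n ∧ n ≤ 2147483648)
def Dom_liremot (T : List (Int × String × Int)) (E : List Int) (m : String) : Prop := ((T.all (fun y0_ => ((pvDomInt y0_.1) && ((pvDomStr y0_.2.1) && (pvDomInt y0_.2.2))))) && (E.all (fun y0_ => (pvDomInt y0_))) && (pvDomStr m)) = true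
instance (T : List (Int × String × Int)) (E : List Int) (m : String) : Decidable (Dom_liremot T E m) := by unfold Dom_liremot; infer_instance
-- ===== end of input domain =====

-- B builds a first-match transition dictionary from T once and simulates the word over a frontier
-- set of live states (word outside, states inside), instead of A's per-start-state walk that
-- rescans T at every step; the ports' result lists are proved equal on every input.

-- ===== PORT A =====
-- inner 'for transition in T: … break' loop: first transition matching (etat_mot, lettre_actuelle)
def liremotScan (T : List (Int × String × Int)) (etat : Int) (c : Char) : Option Int :=
  match T with
  | [] => none
  | t :: ts =>
    if t.1 == etat && t.2.1 == String.singleton c then some t.2.2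
    else liremotScan ts etat c

-- 'while mot_rest: …' loop: returns (etat_mot, mot_rest) as they are at loop exit
def liremotWhile (T : List (Int × String × Int)) (etat : Int) (mot : List Char) : Int × List Char :=
  match mot with
  | [] => (etat, [])
  | c :: rest =>
    match liremotScan T etat c with
    | some r => liremotWhile T r rest
    | none => (etat, c :: rest)

def liremot (T : List (Int × String × Int)) (E : List Int) (m : String) : List Int :=
  E.foldl (fun lst_etat etat =>
    let pr := liremotWhile T etat m.toList
    if pr.2 = [] then PySem.Set.add lst_etat pr.1 else lst_etat) PySem.Set.empty

-- ===== PORT B =====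
-- trans = {}; for q, a, r in T: trans.setdefault((q, a), r)
def liremotAltTrans (T : List (Int × String × Int)) : PySem.Dict (Int × String) Int :=
  T.foldl (fun d t => d.setdefault (t.1, t.2.1) t.2.2) PySem.Dict.empty

-- one letter: suivant = set(); for etat in frontier: if (etat, lettre) in trans: suivant.add(trans[...])
def liremotAltStep (trans : PySem.Dict (Int × String) Int) (frontier : PySem.Set Int) (c : Char) :
    PySem.Set Int :=
  frontier.foldl (fun suivant etat =>
    match trans.get? (etat, String.singleton c) with
    | some r => PySem.Set.add suivant r
    | none => suivant) PySem.Set.empty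

def liremot_alt (T : List (Int × String × Int)) (E : List Int) (m : String) : List Int :=
  m.toList.foldl (liremotAltStep (liremotAltTrans T)) (PySem.Set.ofList E)

-- ===== PRECONDITION & SPEC =====
def Spec_liremot (T : List (Int × String × Int)) (E : List Int) (m : String) (out : List Int) : Prop := out = liremot_alt T E m
instance (T : List (Int × String × Int)) (E : List Int) (m : String) (out : List Int) : Decidable (Spec_liremot T E m out) := by unfold Spec_liremot; infer_instance

-- ===== CLAIM (what is proved, stated in full; the proofs are below) =====
def Claim_equal_liremot : Prop := ∀ (T : List (Int × String × Int)) (E : List Int) (m : String), Dom_liremot T E m → Spec_liremot T E m (liremot T E m)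

-- ===== LEMMAS AND PROOFS =====

-- A's whole-word run from one state, as a partial function (proof-side view of the while loop)
def liremotRun (T : List (Int × String × Int)) : List Char → Int → Option Int
  | [], e => some e
  | c :: cs, e => (liremotScan T e c).bind (liremotRun T cs)

theorem liremotWhile_run (T : List (Int × String × Int)) (cs : List Char) (e : Int) :
    (if (liremotWhile T e cs).2 = [] then some (liremotWhile T e cs).1 else none)
      = liremotRun T cs e := by
  induction cs generalizing e with
  | nil => simp [liremotWhile, liremotRun]
  | cons c cs ih =>
    simp only [liremotWhile, liremotRun]
    cases h : liremotScan T e c with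
    | none => simp
    | some r => simpa using ih r

-- A's outer loop accumulates exactly the successful runs
theorem foldl_if_add (g : Int → Int × List Char) (l : List Int) (s : PySem.Set Int) :
    l.foldl (fun acc e => if (g e).2 = [] then PySem.Set.add acc (g e).1 else acc) s
      = s.update (l.filterMap (fun e => if (g e).2 = [] then some (g e).1 else none)) := by
  induction l generalizing s with
  | nil => rfl
  | cons x l ih =>
    simp only [List.foldl_cons, List.filterMap_cons]
    by_cases h : (g x).2 = []
    · simp [h, ih, PySem.Set.update_cons]
    · simp [h, ih]

-- B's inner loop over the frontier
theorem foldl_match_add (f : Int → Option Int) (l : List Int) (s : PySem.Set Int) :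
    l.foldl (fun acc e => match f e with | some r => PySem.Set.add acc r | none => acc) s
      = s.update (l.filterMap f) := by
  induction l generalizing s with
  | nil => rfl
  | cons x l ih =>
    simp only [List.foldl_cons, List.filterMap_cons]
    cases h : f x with
    | none => simp [ih]
    | some r => simp [ih, PySem.Set.update_cons]

-- dedup commutes with filter
theorem ofList_filter (p : Int → Bool) (l : List Int) :
    PySem.Set.ofList (l.filter p) = List.filter p (PySem.Set.ofList l) := by
  induction l with
  | nil => rfl
  | cons x l ih =>
    by_cases h : p x = true
    · rw [show (x::l).filter p = x :: l.filter p from List.filter_cons_of_pos h,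
        PySem.Set.ofList_cons, PySem.Set.ofList_cons, List.filter_cons_of_pos h, ih]
      simp only [PySem.Set.discard]
      rw [List.filter_filter, List.filter_filter]
      exact congrArg _ (List.filter_congr (fun a _ => by rw [Bool.and_comm]))
    · rw [List.filter_cons_of_neg h, ih, PySem.Set.ofList_cons, List.filter_cons_of_neg h]
      simp only [PySem.Set.discard]
      rw [List.filter_filter]
      refine (List.filter_congr ?_).symm
      intro a _
      by_cases hax : a = x
      · subst hax; simp_all
      · simp [hax]

theorem ofList_cons_filter (x : Int) (l : List Int) :
    PySem.Set.ofList (x :: l) = x :: PySem.Set.ofList (l.filter (fun y => !(y == x))) := by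
  rw [PySem.Set.ofList_cons, ofList_filter]; rfl

-- KEY: dedupping the input of a partial map does not change the dedup of its output
theorem ofList_filterMap_ofList_aux :
    ∀ (n : ℕ) (l : List Int), l.length ≤ n → ∀ (f : Int → Option Int),
      PySem.Set.ofList ((PySem.Set.ofList l).filterMap f) = PySem.Set.ofList (l.filterMap f) := by
  intro n
  induction n with
  | zero =>
    intro l hl f
    rw [List.eq_nil_of_length_eq_zero (Nat.le_zero.mp hl)]
    rfl
  | succ n ih =>
    intro l hl f
    cases l with
    | nil => rfl
    | cons x l' =>
      have hlen : (l'.filter (fun y => !(y == x))).length ≤ n :=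
        le_trans (List.length_filter_le _ _) (Nat.le_of_succ_le_succ hl)
      rw [ofList_cons_filter]
      cases hf : f x with
      | none =>
        rw [List.filterMap_cons_none hf, List.filterMap_cons_none hf, ih _ hlen f,
          List.filterMap_filter]
        congr 1
        refine List.filterMap_congr ?_
        intro a _
        by_cases hax : a = x
        · subst hax; simp [hf]
        · simp [hax]
      | some c =>
        rw [List.filterMap_cons_some hf, List.filterMap_cons_some hf,
          ofList_cons_filter, ofList_cons_filter]
        congr 1
        rw [List.filter_filterMap, List.filter_filterMap, ih _ hlen, List.filterMap_filter]
        congr 1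
        refine List.filterMap_congr ?_
        intro a _
        by_cases hax : a = x
        · subst hax; simp [hf, Option.filter]
        · simp [hax]

theorem ofList_filterMap_ofList (f : Int → Option Int) (l : List Int) :
    PySem.Set.ofList ((PySem.Set.ofList l).filterMap f) = PySem.Set.ofList (l.filterMap f) :=
  ofList_filterMap_ofList_aux l.length l le_rfl f

-- setdefault only fills a hole: lookups see the old binding first
theorem get?_setdefault (d : PySem.Dict (Int × String) Int) (kt k : Int × String) (v : Int) :
    (d.setdefault kt v).get? k = (d.get? k).or (if kt == k then some v else none) := by
  show (if d.contains kt then d else ⟨d.items ++ [(kt, v)]⟩).get? k = _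
  by_cases hc : d.contains kt = true
  · rw [if_pos hc]
    by_cases hk : kt == k
    · have hkk : kt = k := by simpa using hk
      subst hkk
      rw [PySem.Dict.contains_eq_isSome_get?] at hc
      obtain ⟨w, hw⟩ := Option.isSome_iff_exists.mp hc
      simp [hw]
    · simp [hk]
  · rw [if_neg hc]
    show Option.map (fun x => x.2) (List.find? (fun p => p.1 == k) (d.items ++ [(kt, v)])) = _
    rw [List.find?_append]
    have : PySem.Dict.get? d k = Option.map (fun x => x.2) (List.find? (fun p => p.1 == k) d.items) := rfl
    by_cases hk : (kt == k) = true
    · have hkk : kt = k := by simpa using hk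
      rw [hkk] at hc
      have hdk : d.get? k = none := by
        rw [← Option.not_isSome_iff_eq_none, ← PySem.Dict.contains_eq_isSome_get?]
        simpa using hc
      rw [this] at hdk
      have hfind : List.find? (fun p => p.1 == k) d.items = none := by
        cases hfi : List.find? (fun p => p.1 == k) d.items <;> simp [hfi] at hdk ⊢
      simp [hfind, this, hk, List.find?]
    · have hnone : List.find? (fun p : (Int × String) × Int => p.1 == k) [(kt, v)] = none := by
        simp [List.find?, hk]
      simp [hnone, hk]
      rfl

-- the dictionary built by B answers exactly A's first-match scan of T
theorem trans_get_aux (T : List (Int × String × Int)) :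
    ∀ (d : PySem.Dict (Int × String) Int) (e : Int) (c : Char),
      (T.foldl (fun d t => d.setdefault (t.1, t.2.1) t.2.2) d).get? (e, String.singleton c)
        = (d.get? (e, String.singleton c)).or (liremotScan T e c) := by
  induction T with
  | nil => intro d e c; simp [liremotScan]
  | cons t ts ih =>
    intro d e c
    rw [List.foldl_cons, ih, get?_setdefault]
    show _ = (d.get? (e, String.singleton c)).or
        (if t.1 == e && t.2.1 == String.singleton c then some t.2.2 else liremotScan ts e c)
    have hbeq : ((t.1, t.2.1) == (e, String.singleton c)) = (t.1 == e && t.2.1 == String.singleton c) := rfl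
    rw [Option.or_assoc, hbeq]
    by_cases hcond : (t.1 == e && t.2.1 == String.singleton c) = true
    · simp [hcond]
    · simp [hcond]

theorem trans_get (T : List (Int × String × Int)) (e : Int) (c : Char) :
    (liremotAltTrans T).get? (e, String.singleton c) = liremotScan T e c := by
  unfold liremotAltTrans
  rw [trans_get_aux]
  rfl

-- one B-step is ofList ∘ filterMap of A's scan
theorem stepB_eq (T : List (Int × String × Int)) (fr : PySem.Set Int) (c : Char) :
    liremotAltStep (liremotAltTrans T) fr c
      = PySem.Set.ofList (fr.filterMap (fun e => liremotScan T e c)) := by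
  unfold liremotAltStep
  rw [foldl_match_add, PySem.Set.update_empty]
  congr 1
  exact List.filterMap_congr (fun e _ => trans_get T e c)

-- MAIN: the word-major frontier fold equals the dedup of the per-state runs
theorem frontier_eq (T : List (Int × String × Int)) (cs : List Char) :
    ∀ (l : List Int),
      cs.foldl (fun fr c => PySem.Set.ofList (fr.filterMap (fun e => liremotScan T e c)))
          (PySem.Set.ofList l)
        = PySem.Set.ofList (l.filterMap (liremotRun T cs)) := by
  induction cs with
  | nil =>
    intro l
    simp only [List.foldl_nil, liremotRun]
    rw [show l.filterMap (fun e => some e) = l from List.filterMap_some]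
  | cons c cs ih =>
    intro l
    rw [List.foldl_cons, ofList_filterMap_ofList, ih, List.filterMap_filterMap]
    rfl

-- ===== VERDICT (by name: the statement is the Claim_ definition above) =====
theorem liremot_spec : Claim_equal_liremot := by
  intro T E m _
  unfold Spec_liremot liremot liremot_alt
  rw [show (fun (lst_etat : PySem.Set Int) (etat : Int) =>
        let pr := liremotWhile T etat m.toList
        if pr.2 = [] then PySem.Set.add lst_etat pr.1 else lst_etat)
      = (fun acc e => if (liremotWhile T e m.toList).2 = []
          then PySem.Set.add acc (liremotWhile T e m.toList).1 else acc) from rfl,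
    foldl_if_add, PySem.Set.update_empty]
  rw [show liremotAltStep (liremotAltTrans T)
      = (fun fr c => PySem.Set.ofList (fr.filterMap (fun e => liremotScan T e c))) from
    funext fun fr => funext fun c => stepB_eq T fr c]
  rw [frontier_eq]
  congr 1
  exact List.filterMap_congr (fun e _ => liremotWhile_run T m.toList e)
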